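-- pv_equiv track=rewrite | github.com/apervmm/interview_prep | cisc/reversewords.py | reverseWordsAlgo
-- ===== SOURCE A (Python) =====
-- def reverseWordsAlgo(S: str):
--     # Some hard code
--     ar = []
--     start, end = 0, 0
--     for i in range(len(S)):
--         if (c := S[i]) == ".":
--             end = i
--             ar.append(S[start: end])
--             start = end + 1
--
--         if i == len(S) - 1:
--             ar.append(S[start: i+1])
--
--     L, R = 0, len(ar) -1
--     while L < R:
--         temp = ar[L]
--         ar[L] = ar[R]
--         ar[R] = temp
--         L += 1
--         R -= 1
--
--     return ".".join(ar)
-- ===== SOURCE B (Python) =====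
-- def reverseWordsAlgo(S: str):
--     # Two-step reverse-words: reverse the whole string, then restore each
--     # dot-delimited word's internal character order in a single left-to-right pass.
--     out = []
--     word = []
--     for c in reversed(S):
--         if c == ".":
--             out.extend(reversed(word))
--             out.append(".")
--             word = []
--         else:
--             word.append(c)
--     out.extend(reversed(word))
--     return "".join(out)
-- ===== Notes on version B (the rewrite author's own statement) =====
-- stated objective: alternative
-- what changed: Replaces the index-based segment collection (slice list, explicit two-pointer in-place reversal, '.'.join) by the classic two-step reverse-words algorithm: one pass over the reversed string that re-reverses each dot-delimited run of characters in place.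
import Mathlib
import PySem

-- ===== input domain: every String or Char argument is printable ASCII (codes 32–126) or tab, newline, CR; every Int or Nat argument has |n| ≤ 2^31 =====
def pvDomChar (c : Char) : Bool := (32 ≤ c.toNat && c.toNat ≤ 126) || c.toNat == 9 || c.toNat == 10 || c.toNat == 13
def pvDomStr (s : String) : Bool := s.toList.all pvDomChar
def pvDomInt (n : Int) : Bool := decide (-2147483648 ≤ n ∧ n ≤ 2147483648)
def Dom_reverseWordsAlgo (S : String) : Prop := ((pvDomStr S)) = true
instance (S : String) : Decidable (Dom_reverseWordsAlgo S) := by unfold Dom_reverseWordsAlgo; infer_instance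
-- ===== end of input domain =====

-- B replaces A's slice-list + explicit two-pointer reversal + join by the classic
-- two-step reverse-words pass over the reversed string (objective: alternative).

-- ===== PORT A =====

-- ".".join(ar): the join library call, ported as this fold over List Char
def joinDot : List (List Char) → List Char
  | [] => []
  | [w] => w
  | w :: ws => w ++ '.' :: joinDot ws

-- the `for i in range(len(S))` loop of A; the slices S[start:end] (0 ≤ start ≤ end ≤ len)
-- are exact as (s.drop start).take (end - start); S[i] is exact as s.getD i _ since i < len
def aLoop (s : List Char) (i : Nat) (ar : List (List Char)) (start : Nat) :
    List (List Char) :=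
  if _h : i < s.length then
    let ar1 := if s.getD i ' ' = '.' then ar ++ [(s.drop start).take (i - start)] else ar
    let start1 := if s.getD i ' ' = '.' then i + 1 else start
    let ar2 := if i = s.length - 1 then ar1 ++ [(s.drop start1).take (i + 1 - start1)] else ar1
    aLoop s (i + 1) ar2 start1
  else ar
termination_by s.length - i

-- the `while L < R` two-pointer swap loop of A; L, R are Nat (R = len-1 truncates
-- only for ar = [], where Python's R = -1 likewise skips the loop)
def swapLoop (ar : List (List Char)) (L R : Nat) : List (List Char) :=
  if _h : L < R then
    swapLoop ((ar.set L (ar.getD R [])).set R (ar.getD L [])) (L + 1) (R - 1)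
  else ar
termination_by R - L

def reverseWordsAlgo (S : String) : String :=
  let s := S.toList
  let ar := aLoop s 0 [] 0
  let ar2 := swapLoop ar 0 (ar.length - 1)
  String.ofList (joinDot ar2)

-- ===== PORT B =====

-- the single pass of B over reversed(S): out / word accumulators as in Source B
def bLoop (cs : List Char) (out : List Char) (word : List Char) : List Char :=
  match cs with
  | [] => out ++ word.reverse
  | c :: rest =>
    if c = '.' then bLoop rest (out ++ word.reverse ++ ['.']) []
    else bLoop rest out (word ++ [c])

def reverseWordsAlgo_alt (S : String) : String :=
  String.ofList (bLoop S.toList.reverse [] [])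

-- ===== PRECONDITION & SPEC =====
def Spec_reverseWordsAlgo (S : String) (out : String) : Prop := out = reverseWordsAlgo_alt S
instance (S : String) (out : String) : Decidable (Spec_reverseWordsAlgo S out) := by unfold Spec_reverseWordsAlgo; infer_instance

-- ===== CLAIM (what is proved, stated in full; the proofs are below) =====
def Claim_equal_reverseWordsAlgo : Prop := ∀ (S : String), Dom_reverseWordsAlgo S → Spec_reverseWordsAlgo S (reverseWordsAlgo S)

-- ===== LEMMAS AND PROOFS =====

-- the segments of s between dots (proof-side characterisation shared by both ports)
def splitDot : List Char → List (List Char)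
  | [] => [[]]
  | c :: cs =>
    if c = '.' then [] :: splitDot cs
    else
      match splitDot cs with
      | [] => [[c]]
      | w :: ws => (c :: w) :: ws

theorem splitDot_ne_nil (l : List Char) : splitDot l ≠ [] := by
  induction l with
  | nil => simp [splitDot]
  | cons c cs ih =>
    simp only [splitDot]
    split
    · simp
    · cases h : splitDot cs <;> simp

theorem splitDot_no_dot (l : List Char) (h : ∀ c ∈ l, c ≠ '.') : splitDot l = [l] := by
  induction l with
  | nil => rfl
  | cons c cs ih =>
    have hc : c ≠ '.' := h c (by simp)
    have := ih (fun x hx => h x (by simp [hx]))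
    simp [splitDot, hc, this]

theorem splitDot_append_dot (a b : List Char) :
    splitDot (a ++ '.' :: b) = splitDot a ++ splitDot b := by
  induction a with
  | nil => simp [splitDot]
  | cons c cs ih =>
    by_cases hc : c = '.'
    · simp [splitDot, hc, ih]
    · simp only [List.cons_append, splitDot, if_neg hc, ih]
      cases h : splitDot cs with
      | nil => exact absurd h (splitDot_ne_nil cs)
      | cons w ws => simp

theorem joinDot_cons (x : List Char) (ys : List (List Char)) (h : ys ≠ []) :
    joinDot (x :: ys) = x ++ '.' :: joinDot ys := by
  cases ys with
  | nil => exact absurd rfl h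
  | cons y ys => rfl

-- decomposition of the tail at index i
theorem drop_decomp (s : List Char) (start i : Nat) (hi : i < s.length) (hs : start ≤ i) :
    s.drop start = (s.drop start).take (i - start) ++ s.getD i ' ' :: s.drop (i + 1) := by
  have h2 : (s.drop start).drop (i - start) = s.drop i := by
    rw [List.drop_drop]; congr 1; omega
  have h3 : s.drop i = s.getD i ' ' :: s.drop (i + 1) := by
    rw [List.getD_eq_getElem s ' ' hi]
    exact List.drop_eq_getElem_cons hi
  calc s.drop start = (s.drop start).take (i - start) ++ (s.drop start).drop (i - start) :=
        (List.take_append_drop _ _).symm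
    _ = (s.drop start).take (i - start) ++ s.getD i ' ' :: s.drop (i + 1) := by rw [h2, h3]

theorem aLoop_eq (s : List Char) (i start : Nat) (ar : List (List Char))
    (hi : i < s.length) (hs : start ≤ i)
    (hn : ∀ c ∈ (s.drop start).take (i - start), c ≠ '.') :
    aLoop s i ar start = ar ++ splitDot (s.drop start) := by
  have hdec := drop_decomp s start i hi hs
  rw [aLoop, dif_pos hi]
  by_cases hdot : s.getD i ' ' = '.'
  · have hsplit : splitDot (s.drop start) =
        (s.drop start).take (i - start) :: splitDot (s.drop (i + 1)) := by
      conv_lhs => rw [hdec]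
      rw [hdot, splitDot_append_dot, splitDot_no_dot _ hn]
      simp
    by_cases hlast : i = s.length - 1
    · have hlen : i + 1 = s.length := by omega
      have hdropnil : s.drop (i + 1) = [] := by rw [hlen]; simp
      simp only [if_pos hdot, if_pos hlast]
      rw [aLoop, dif_neg (by omega : ¬ i + 1 < s.length)]
      rw [hsplit, hdropnil]
      simp [splitDot]
    · simp only [if_pos hdot, if_neg hlast]
      rw [aLoop_eq s (i + 1) (i + 1) _ (by omega) le_rfl (by simp), hsplit]
      simp
  · have hn' : ∀ x ∈ (s.drop start).take (i + 1 - start), x ≠ '.' := by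
      intro x hx
      have hts : i + 1 - start = (i - start) + 1 := by omega
      rw [hts, List.take_add_one] at hx
      rcases List.mem_append.mp hx with h | h
      · exact hn x h
      · have hglt : i - start < (s.drop start).length := by simp [List.length_drop]; omega
        have hget : (s.drop start)[i - start]? = some (s.getD i ' ') := by
          rw [List.getElem?_eq_getElem hglt]
          congr 1
          rw [List.getElem_drop, List.getD_eq_getElem s ' ' hi]
          congr 1; omega
        rw [hget] at h
        simp only [Option.toList_some, List.mem_singleton] at h
        subst h; exact hdot
    by_cases hlast : i = s.length - 1
    · have htake : (s.drop start).take (i + 1 - start) = s.drop start := by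
        apply List.take_of_length_le
        simp [List.length_drop]; omega
      have hsp : splitDot (s.drop start) = [s.drop start] := by
        apply splitDot_no_dot
        intro x hx; exact hn' x (by rwa [htake])
      simp only [if_neg hdot, if_pos hlast]
      rw [aLoop, dif_neg (by omega : ¬ i + 1 < s.length)]
      rw [htake, hsp]
    · simp only [if_neg hdot, if_neg hlast]
      exact aLoop_eq s (i + 1) start ar (by omega) (by omega) hn'
termination_by s.length - i

theorem swapLoop_spec (n : Nat) : ∀ (m u v : List (List Char)) (L R : Nat),
    m.length = n → u.length = L → L + m.length = R + 1 →
    swapLoop (u ++ m ++ v) L R = u ++ m.reverse ++ v := by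
  induction n using Nat.strong_induction_on with
  | _ n ih =>
    intro m u v L R hmn hu hLR
    rw [swapLoop]
    by_cases hLt : L < R
    · rw [dif_pos hLt]
      have hm2 : 2 ≤ m.length := by omega
      cases m with
      | nil => simp at hm2
      | cons a rest =>
        rcases List.eq_nil_or_concat rest with rfl | ⟨ms, b, rfl⟩
        · simp at hm2
        · -- ar = u ++ a :: (ms ++ b :: v), prefix to R is u ++ a :: ms
          rw [List.concat_eq_append] at hmn hLR hm2 ⊢
          have hlms : R = L + ms.length + 1 := by simp at hLR; omega
          have hR : R = (u ++ a :: ms).length := by simp [hu]; omega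
          have hassoc : u ++ (a :: (ms ++ [b])) ++ v = u ++ a :: (ms ++ b :: v) := by simp
          have hgetR : (u ++ (a :: (ms ++ [b])) ++ v).getD R [] = b := by
            have : u ++ (a :: (ms ++ [b])) ++ v = (u ++ a :: ms) ++ b :: v := by simp
            rw [this, hR]; simp [List.getD]
          have hgetL : (u ++ (a :: (ms ++ [b])) ++ v).getD L [] = a := by
            rw [hassoc, ← hu]; simp [List.getD]
          have hsetL : (u ++ (a :: (ms ++ [b])) ++ v).set L b = u ++ b :: (ms ++ b :: v) := by
            rw [hassoc, ← hu]; simp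
          have hsetR : (u ++ b :: (ms ++ b :: v)).set R a = (u ++ [b]) ++ ms ++ a :: v := by
            have h1 : u ++ b :: (ms ++ b :: v) = (u ++ b :: ms) ++ b :: v := by simp
            have h2 : R = (u ++ b :: ms).length := by simpa using hR
            rw [h1, h2]; simp
          rw [hgetR, hgetL, hsetL, hsetR]
          have hrec := ih ms.length (by simp at hmn; omega) ms (u ++ [b]) (a :: v)
            (L + 1) (R - 1) rfl (by simp [hu]) (by omega)
          rw [hrec]
          simp
    · rw [dif_neg hLt]
      have hm1 : m.length ≤ 1 := by omega
      have : m.reverse = m := by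
        cases m with
        | nil => rfl
        | cons a rest => cases rest with
          | nil => rfl
          | cons b t => simp at hm1
      rw [this]

theorem bLoop_eq (cs : List Char) : ∀ (out word : List Char),
    (∀ c ∈ word, c ≠ '.') →
    bLoop cs out word = out ++ joinDot ((splitDot (cs.reverse ++ word.reverse)).reverse) := by
  induction cs with
  | nil =>
    intro out word hw
    have : splitDot word.reverse = [word.reverse] := by
      apply splitDot_no_dot; intro c hc; exact hw c (List.mem_reverse.mp hc)
    simp [bLoop, this, joinDot]
  | cons c rest ih =>
    intro out word hw
    by_cases hc : c = '.'
    · have h1 := ih (out ++ word.reverse ++ ['.']) [] (by simp)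
      simp only [bLoop, if_pos hc, h1]
      have h2 : splitDot (rest.reverse ++ ([c] ++ word.reverse))
          = splitDot rest.reverse ++ [word.reverse] := by
        rw [hc, List.singleton_append, splitDot_append_dot]
        congr 1
        apply splitDot_no_dot; intro x hx; exact hw x (List.mem_reverse.mp hx)
      have h3 : (splitDot rest.reverse).reverse ≠ [] := by
        simp [splitDot_ne_nil]
      simp only [List.reverse_cons, List.append_assoc]
      rw [h2, List.reverse_append]
      simp only [List.reverse_singleton, List.singleton_append]
      rw [joinDot_cons _ _ h3]
      simp
    · have h1 := ih out (word ++ [c]) (by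
        intro x hx
        rcases List.mem_append.mp hx with h | h
        · exact hw x h
        · simp at h; simp [h, hc])
      simp only [bLoop, if_neg hc, h1]
      congr 3
      simp

theorem reverseWordsAlgo_eq_alt (S : String) : reverseWordsAlgo S = reverseWordsAlgo_alt S := by
  simp only [reverseWordsAlgo, reverseWordsAlgo_alt]
  cases h : S.toList with
  | nil =>
    rw [show aLoop [] 0 [] 0 = [] by rw [aLoop]; simp]
    rw [show swapLoop [] 0 ([].length - 1) = ([] : List (List Char)) by rw [swapLoop]; simp]
    rw [show bLoop [].reverse [] [] = [] by rw [List.reverse_nil]; rfl]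
    rfl
  | cons c cs =>
    have hlen : 0 < S.toList.length := by simp [h]
    have h1 : aLoop S.toList 0 [] 0 = splitDot S.toList := by
      have := aLoop_eq S.toList 0 0 [] hlen le_rfl (by simp)
      simpa using this
    have hsne : (splitDot S.toList).length ≥ 1 :=
      List.length_pos_of_ne_nil (splitDot_ne_nil _)
    have h2 : swapLoop (splitDot S.toList) 0 ((splitDot S.toList).length - 1)
        = (splitDot S.toList).reverse := by
      have := swapLoop_spec (splitDot S.toList).length (splitDot S.toList) [] []
        0 ((splitDot S.toList).length - 1) rfl rfl (by omega)
      simpa using this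
    have h3 : bLoop S.toList.reverse [] [] = joinDot ((splitDot S.toList).reverse) := by
      have := bLoop_eq S.toList.reverse [] [] (by simp)
      simpa using this
    rw [h] at h1 h2 h3
    rw [h1, h2, h3]

-- ===== VERDICT (by name: the statement is the Claim_ definition above) =====
theorem reverseWordsAlgo_spec : Claim_equal_reverseWordsAlgo := by
  intro S _
  unfold Spec_reverseWordsAlgo
  exact reverseWordsAlgo_eq_alt S
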